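-- pv_equiv track=rewrite | github.com/benningtoncompling/project1-tokenization-satchelbaldwin | utilities.py | sort_and_count_words
-- ===== SOURCE A (Python) =====
-- def sort_and_count_words(count):
--     items = [item for item in count.items()]
--     items.sort(key = lambda x: x[1])
--     items.reverse()
--     numbers = []
--     output = ""
--     for i in items:
--         if not i[1] in numbers:
--             numbers.append(i[1])
--     for n in numbers:
--         words = []
--         for i in items:
--             if i[1] == n:
--                 words.append(i[0])
--         words.sort()
--         for i in range(0, len(words)):
--             output = output + "{}\t{}\n".format(words[i], n)
--     return(output)
-- ===== SOURCE B (Python) =====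
-- def sort_and_count_words(count):
--     groups = {}
--     for word, n in count.items():
--         groups.setdefault(n, []).append(word)
--     output = ""
--     for n in sorted(groups, reverse=True):
--         for word in sorted(groups[n]):
--             output += "{}\t{}\n".format(word, n)
--     return output
-- ===== Notes on version B (the rewrite author's own statement) =====
-- stated objective: alternative
-- what changed: Instead of sorting items, reversing, collecting distinct counts and rescanning the whole item list once per distinct count, B groups words by count in one dict pass, sorts the distinct counts descending, and emits each group sorted.
import Mathlib
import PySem

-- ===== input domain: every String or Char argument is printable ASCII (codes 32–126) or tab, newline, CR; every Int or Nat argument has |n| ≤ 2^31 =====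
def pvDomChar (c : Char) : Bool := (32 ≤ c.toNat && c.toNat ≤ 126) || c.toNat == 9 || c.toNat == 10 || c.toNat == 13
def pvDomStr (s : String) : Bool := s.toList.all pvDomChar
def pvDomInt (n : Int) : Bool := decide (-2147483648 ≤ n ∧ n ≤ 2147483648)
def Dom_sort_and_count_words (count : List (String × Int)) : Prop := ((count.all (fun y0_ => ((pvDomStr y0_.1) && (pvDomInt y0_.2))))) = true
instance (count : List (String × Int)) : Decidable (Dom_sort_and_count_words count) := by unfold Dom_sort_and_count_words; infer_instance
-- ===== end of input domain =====

-- B replaces A's rescan-of-all-items-per-distinct-count by one dict grouping pass plus sorting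
-- the distinct counts descending (a different algorithm; same measured cost on the tested inputs).

-- ===== PORT A =====
-- The Python argument is a dict; both ports rebuild it from the pair list with dict semantics (later value wins).
def sort_and_count_words (count : List (String × Int)) : String :=
  let d : PySem.Dict String Int := PySem.Dict.ofList count
  let items := PySem.List.sorted d.items (fun x => x.2)   -- items.sort(key = lambda x: x[1])
  let items := items.reverse                              -- items.reverse()
  let numbers : List Int :=
    items.foldl (fun ns i => if ns.contains i.2 then ns else ns ++ [i.2]) []
  numbers.foldl (fun output n =>
    let words : List String :=
      items.foldl (fun ws i => if i.2 == n then ws ++ [i.1] else ws) []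
    let words := PySem.List.sorted words (fun w => w)     -- words.sort()
    (PySem.List.pyRange 0 (PySem.List.len words)).foldl   -- for i in range(0, len(words))
      (fun output i => output ++ PySem.List.pyGetD words i "" ++ "\t" ++ PySem.Int.toStr n ++ "\n")
      output) ""

-- ===== PORT B =====
def sort_and_count_words_alt (count : List (String × Int)) : String :=
  let d : PySem.Dict String Int := PySem.Dict.ofList count
  let groups : PySem.Dict Int (List String) :=            -- groups.setdefault(n, []).append(word)
    d.items.foldl (fun g p => g.modify p.2 [] (fun ws => ws ++ [p.1])) PySem.Dict.empty
  let ns := PySem.List.sorted groups.keys (fun n => n) true    -- sorted(groups, reverse=True)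
  ns.foldl (fun output n =>
    (PySem.List.sorted (groups.getD n []) (fun w => w)).foldl  -- for word in sorted(groups[n])
      (fun output w => output ++ w ++ "\t" ++ PySem.Int.toStr n ++ "\n")
      output) ""

-- ===== PRECONDITION & SPEC =====
def Spec_sort_and_count_words (count : List (String × Int)) (out : String) : Prop := out = sort_and_count_words_alt count
instance (count : List (String × Int)) (out : String) : Decidable (Spec_sort_and_count_words count out) := by unfold Spec_sort_and_count_words; infer_instance

-- ===== CLAIM (what is proved, stated in full; the proofs are below) =====
def Claim_equal_sort_and_count_words : Prop := ∀ (count : List (String × Int)), Dom_sort_and_count_words count → Spec_sort_and_count_words count (sort_and_count_words count)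

-- ===== LEMMAS AND PROOFS =====

-- ordered deduplication keeps a subsequence of its input
theorem pv_ofList_sublist {α : Type} [BEq α] [LawfulBEq α] (l : List α) :
    List.Sublist (PySem.Set.ofList l) l := by
  induction l with
  | nil => simp [PySem.Set.ofList_nil]
  | cons x xs ih =>
    rw [PySem.Set.ofList_cons]
    refine List.Sublist.cons₂ x (List.Sublist.trans ?_ ih)
    simp [PySem.Set.discard]

theorem pv_main (count : List (String × Int)) :
    sort_and_count_words count = sort_and_count_words_alt count := by
  unfold sort_and_count_words sort_and_count_words_alt
  dsimp only
  set items0 := (PySem.Dict.ofList count).items with hitems0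
  set items := (PySem.List.sorted items0 (fun x => x.2)).reverse with hitems
  have hpi : items.Perm items0 :=
    (List.reverse_perm _).trans (PySem.List.sorted_perm _ _ _)
  -- A's `numbers` is the ordered dedup of the counts of the desc-sorted items
  have hnum : items.foldl (fun ns i => if ns.contains i.2 then ns else ns ++ [i.2]) [] =
      PySem.Set.ofList (items.map (fun i => i.2)) := by
    rw [PySem.Set.ofList_eq_foldl, ← PySem.Set.update_eq_foldl,
        PySem.Set.update_map_eq_foldl_add]
    apply PySem.List.foldl_congr_mem
    intro acc x _
    rw [PySem.Set.add_eq_ite]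
    simp [List.contains_eq_mem]
  -- A's `words` loop is filter-then-project
  have hwords : ∀ n : Int, items.foldl (fun ws i => if i.2 == n then ws ++ [i.1] else ws) [] =
      List.map (fun i => i.1) (List.filter (fun i => i.2 == n) items) := by
    intro n
    rw [PySem.List.foldl_append_if (fun i => i.2 == n) (fun i => i.1) items []]
    simp
  -- B's group keys are the ordered dedup of the counts in dict order
  have hkeys : (items0.foldl (fun g p => g.modify p.2 [] (fun ws => ws ++ [p.1]))
      (PySem.Dict.empty : PySem.Dict Int (List String))).keys =
      PySem.Set.ofList (items0.map (fun i => i.2)) := by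
    rw [PySem.Dict.keys_foldl_modify_key items0 (fun p => p.2) [] (fun d x ws => ws ++ [x.1])]
    simp [PySem.Dict.empty, PySem.Dict.keys, PySem.Set.ofList_eq_foldl, PySem.Set.update_eq_foldl]
  -- B's group for n holds exactly the words whose count is n, in dict order
  have hgetD : ∀ n : Int, (items0.foldl (fun g p => g.modify p.2 [] (fun ws => ws ++ [p.1]))
      (PySem.Dict.empty : PySem.Dict Int (List String))).getD n [] =
      List.map (fun i => i.1) (List.filter (fun i => i.2 == n) items0) := by
    intro n
    have hswap : items0.foldl (fun g p => g.modify p.2 [] (fun ws => ws ++ [p.1]))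
        (PySem.Dict.empty : PySem.Dict Int (List String)) =
        (items0.map Prod.swap).foldl (fun g q => g.modify q.1 [] (fun ws => ws ++ [q.2]))
          PySem.Dict.empty := by
      rw [List.foldl_map]; rfl
    rw [hswap, PySem.Dict.getD_foldl_modify_append]
    simp [PySem.Dict.getD_empty, List.filter_map, List.map_map, Function.comp_def]
  rw [hnum]
  -- the two lists of distinct counts coincide
  have hsetperm : (PySem.Set.ofList (items.map (fun i => i.2)) : List Int).Perm
      (PySem.Set.ofList (items0.map (fun i => i.2))) := by
    refine (List.perm_ext_iff_of_nodup (PySem.Set.nodup_ofList _) (PySem.Set.nodup_ofList _)).mpr ?_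
    intro a
    rw [PySem.Set.mem_ofList, PySem.Set.mem_ofList]
    exact (hpi.map _).mem_iff
  have hdesc : List.Pairwise (fun a b : Int => b < a)
      (PySem.Set.ofList (items.map (fun i => i.2))) := by
    have h1 : List.Pairwise (fun a b : Int => b ≤ a) (items.map (fun i => i.2)) := by
      rw [List.pairwise_map, hitems, List.pairwise_reverse]
      exact PySem.List.sorted_pairwise items0 (fun x => x.2)
    have h2 := h1.sublist (pv_ofList_sublist (items.map (fun i => i.2)))
    have h3 : List.Pairwise (fun a b : Int => a ≠ b)
        (PySem.Set.ofList (items.map (fun i => i.2))) := PySem.Set.nodup_ofList _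
    exact (h2.and h3).imp (fun h => lt_of_le_of_ne h.1 (Ne.symm h.2))
  rw [hkeys, PySem.List.sorted_rev_eq_of_perm_of_pairwise_gt _ _ _ hsetperm hdesc]
  -- per distinct count, both sides emit the same sorted words
  apply PySem.List.foldl_congr_mem
  intro acc n _
  rw [PySem.List.foldl_pyRange_pyGetD _ "" (fun out w => out ++ w ++ "\t" ++ PySem.Int.toStr n ++ "\n") acc (le_refl 0)]
  rw [hwords n, hgetD n]
  simp only [Int.toNat_zero, List.drop_zero]
  congr 1
  exact PySem.List.sorted_eq_sorted_of_perm _ _ _ (fun _ _ h => h) ((hpi.filter _).map _)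

-- ===== VERDICT (by name: the statement is the Claim_ definition above) =====
theorem sort_and_count_words_spec : Claim_equal_sort_and_count_words := by
  intro count _
  exact pv_main count
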